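-- pv_equiv track=rewrite | github.com/0xnedarjercon/walletProtector | getBalances.py | getSigniatures
-- ===== SOURCE A (Python) =====
-- def getSigniatures(events, many=True):
--     if many:
--         arr= [','.join(t for t in events[:len(events)-i]) for i in range(len(events))]
--     else:
--         arr = [','.join(t for t in events)]
--         if len(arr) == 1 and arr[0] == '':
--             arr = []
--     return arr
-- ===== SOURCE B (Python) =====
-- def getSigniatures(events, many=True):
--     if many:
--         acc = []
--         s = None
--         for t in events:
--             s = t if s is None else s + ',' + t
--             acc.append(s)
--         return list(reversed(acc))
--     joined = ','.join(events)
--     return [joined] if joined else []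
-- ===== Notes on version B (the rewrite author's own statement) =====
-- stated objective: faster
-- what changed: Replaces re-joining every prefix from scratch (quadratic in total text) with a single pass that extends one running joined string per element and reverses the collected list at the end; the many=False branch tests the joined string directly instead of building and inspecting a one-element list.
import Mathlib
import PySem

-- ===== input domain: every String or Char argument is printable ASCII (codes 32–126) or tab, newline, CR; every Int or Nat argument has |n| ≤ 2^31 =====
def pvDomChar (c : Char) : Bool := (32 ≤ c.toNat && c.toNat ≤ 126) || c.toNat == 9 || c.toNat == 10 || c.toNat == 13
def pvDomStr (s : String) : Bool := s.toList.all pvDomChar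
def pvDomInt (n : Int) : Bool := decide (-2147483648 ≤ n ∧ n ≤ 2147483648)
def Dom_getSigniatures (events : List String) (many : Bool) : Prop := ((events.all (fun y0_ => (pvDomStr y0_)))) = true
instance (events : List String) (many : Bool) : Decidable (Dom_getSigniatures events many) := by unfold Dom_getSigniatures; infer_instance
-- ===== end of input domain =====

-- B replaces A's per-prefix re-join with one accumulating pass plus a reversal (measured faster); same return values everywhere.

-- ===== PORT A =====
def getSigniatures (events : List String) (many : Bool) : List String :=
  if many then
    (PySem.List.pyRange 0 (events.length : Int) 1).map
      (fun i => PySem.Str.join "," (PySem.List.slice events none (some ((events.length : Int) - i))))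
  else
    let arr := [PySem.Str.join "," events]
    if arr.length == 1 && (PySem.List.pyGet? arr 0 == some "") then [] else arr

-- ===== PORT B =====
-- one fold step of Source B's loop: extend the running join (None before the first element), append it
def gsStep (st : Option String × List String) (t : String) : Option String × List String :=
  match st with
  | (none, acc) => (some t, acc ++ [t])
  | (some s, acc) => (some (s ++ "," ++ t), acc ++ [s ++ "," ++ t])

def getSigniatures_alt (events : List String) (many : Bool) : List String :=
  if many then
    ((events.foldl gsStep (none, [])).2).reverse
  else
    let joined := PySem.Str.join "," events
    if joined == "" then [] else [joined]

-- ===== PRECONDITION & SPEC =====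
def Spec_getSigniatures (events : List String) (many : Bool) (out : List String) : Prop := out = getSigniatures_alt events many
instance (events : List String) (many : Bool) (out : List String) : Decidable (Spec_getSigniatures events many out) := by unfold Spec_getSigniatures; infer_instance

-- ===== CLAIM (what is proved, stated in full; the proofs are below) =====
def Claim_equal_getSigniatures : Prop := ∀ (events : List String) (many : Bool), Dom_getSigniatures events many → Spec_getSigniatures events many (getSigniatures events many)

-- ===== LEMMAS AND PROOFS =====

theorem intercalate_cons_cons' (sep x y : List Char) (ys : List (List Char)) :
    sep.intercalate (x :: y :: ys) = x ++ sep ++ sep.intercalate (y :: ys) := by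
  simp [List.intercalate, List.append_assoc]

theorem chars_join_snoc (sep : List Char) (l : List (List Char)) (t : List Char) (h : l ≠ []) :
    PySem.Chars.join sep (l ++ [t]) = PySem.Chars.join sep l ++ sep ++ t := by
  induction l with
  | nil => exact absurd rfl h
  | cons x xs ih =>
    cases xs with
    | nil => simp [PySem.Chars.join, List.intercalate]
    | cons y ys =>
      have ihh := ih (by simp)
      simp only [PySem.Chars.join, List.cons_append] at ihh ⊢
      rw [intercalate_cons_cons', intercalate_cons_cons', ihh]
      simp [List.append_assoc]

theorem str_join_snoc (l : List String) (t : String) (h : l ≠ []) :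
    PySem.Str.join "," (l ++ [t]) = PySem.Str.join "," l ++ "," ++ t := by
  have h2 : List.map String.toList l ≠ [] := fun hc => h (List.map_eq_nil_iff.mp hc)
  apply String.toList_inj.mp
  simp [PySem.Str.toList_join, chars_join_snoc _ _ _ h2]

theorem map_take_snoc (es : List String) (t : String) :
    (List.range (es ++ [t]).length).map (fun k => PySem.Str.join "," ((es ++ [t]).take (k+1)))
      = (List.range es.length).map (fun k => PySem.Str.join "," (es.take (k+1)))
        ++ [PySem.Str.join "," (es ++ [t])] := by
  rw [show (es ++ [t]).length = es.length + 1 by simp, List.range_succ, List.map_append]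
  congr 1
  · apply List.map_congr_left
    intro k hk
    simp only [List.mem_range] at hk
    rw [List.take_append_of_le_length (by simp; omega)]
  · simp [List.take_of_length_le]

-- invariant of Source B's loop
theorem gs_fold_eq (es : List String) :
    es.foldl gsStep (none, []) =
      ((if es = [] then none else some (PySem.Str.join "," es)),
       (List.range es.length).map (fun k => PySem.Str.join "," (es.take (k+1)))) := by
  induction es using List.reverseRecOn with
  | nil => simp
  | append_singleton es t ih =>
    rw [List.foldl_append, ih]
    cases es with
    | nil =>
      simp [gsStep, PySem.Str.join, PySem.Chars.join, List.intercalate]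
    | cons x xs =>
      rw [if_neg (List.cons_ne_nil x xs)]
      have hne : (x :: xs) ++ [t] ≠ [] := by simp
      rw [if_neg hne, map_take_snoc, str_join_snoc _ t (List.cons_ne_nil x xs)]
      rfl

theorem a_char (es : List String) :
    getSigniatures es true = (List.range es.length).map
      (fun k => PySem.Str.join "," (es.take (es.length - k))) := by
  unfold getSigniatures
  rw [if_pos rfl, PySem.List.pyRange_one]
  simp only [Int.sub_zero, Int.toNat_natCast, List.map_map]
  apply List.map_congr_left
  intro k hk
  simp only [List.mem_range] at hk
  simp only [Function.comp_apply, Int.zero_add]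
  rw [show ((es.length : Int) - (k : Int)) = (((es.length - k : Nat) : Int)) by omega,
    PySem.List.slice_to_natCast]

theorem getSigniatures_spec_aux : ∀ (events : List String) (many : Bool),
    getSigniatures events many = getSigniatures_alt events many := by
  intro es many
  cases many with
  | false =>
    unfold getSigniatures getSigniatures_alt
    simp only [Bool.false_eq_true, ite_false]
    by_cases h : PySem.Str.join "," es = "" <;>
      simp [h, PySem.List.pyGet?, PySem.List.pyIdx?]
  | true =>
    have hB : getSigniatures_alt es true
        = ((List.range es.length).map (fun k => PySem.Str.join "," (es.take (k+1)))).reverse := by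
      unfold getSigniatures_alt
      rw [if_pos rfl, gs_fold_eq]
    rw [a_char, hB]
    apply List.ext_getElem
    · simp
    · intro i h1 h2
      simp only [List.getElem_reverse, List.getElem_map, List.getElem_range,
        List.length_map, List.length_range]
      simp only [List.length_map, List.length_range] at h1 h2
      congr 2
      omega

-- ===== VERDICT (by name: the statement is the Claim_ definition above) =====
theorem getSigniatures_spec : Claim_equal_getSigniatures := by
  intro events many _
  unfold Spec_getSigniatures
  exact getSigniatures_spec_aux events many
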